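-- pv_equiv track=rewrite | github.com/pypi-data/pypi-mirror-366 | packages/mapFolding/mapfolding-0.14.0.tar.gz/mapfolding-0.14.0/mapFolding/reference/A005316primitiveOptimized.py | initializeA000682
-- ===== SOURCE A (Python) =====
-- def initializeA000682(n: int) -> dict[int, int]:
-- 	bridgesTotalIsOdd = (n & 1) == 1
-- 	archStateLimit = 1 << (2 + (2 * (n + 1)))
--
-- 	dictionaryStateToTotal: dict[int, int] = {}
-- 	arrayBitPattern = 1 if bridgesTotalIsOdd else ((1 << 2) | 1)
--
-- 	arrayPackedState = arrayBitPattern | arrayBitPattern << 1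
-- 	while arrayPackedState < archStateLimit:
-- 		dictionaryStateToTotal[arrayPackedState] = 1
-- 		arrayBitPattern = ((arrayBitPattern << 2) | 1) << 2 | 1
-- 		arrayPackedState = arrayBitPattern | arrayBitPattern << 1
--
-- 	return dictionaryStateToTotal
-- ===== SOURCE B (Python) =====
-- def initializeA000682(n: int) -> dict[int, int]:
-- 	# Keys are the all-ones numbers 2**(4*k + offset) - 1; closed form instead of
-- 	# the incremental bit-pattern loop.
-- 	offset = 2 if n & 1 else 4
-- 	count = (2 * n + 4 - offset) // 4 + 1
-- 	return {(1 << (4 * k + offset)) - 1: 1 for k in range(count)}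
-- ===== Notes on version B (the rewrite author's own statement) =====
-- stated objective: simpler
-- what changed: B replaces the incremental bit-pattern/packed-state while-loop with a closed form: it computes how many keys fit under the limit and emits each key directly as 2**(4*k+offset)-1 via a dict comprehension.
import Mathlib
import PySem

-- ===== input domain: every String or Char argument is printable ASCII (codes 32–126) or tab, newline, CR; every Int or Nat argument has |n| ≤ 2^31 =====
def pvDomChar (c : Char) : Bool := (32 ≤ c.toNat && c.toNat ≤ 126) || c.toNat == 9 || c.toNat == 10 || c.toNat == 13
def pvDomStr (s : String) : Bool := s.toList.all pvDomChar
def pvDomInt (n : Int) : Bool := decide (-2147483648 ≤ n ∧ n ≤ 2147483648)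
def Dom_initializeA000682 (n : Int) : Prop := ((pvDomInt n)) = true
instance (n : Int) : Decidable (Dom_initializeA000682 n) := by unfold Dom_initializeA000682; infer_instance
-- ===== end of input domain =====

-- B replaces A's incremental bit-pattern/packed-state while-loop by a closed form that
-- emits each key 2^(4k+offset)-1 directly from a counted range (objective: simpler).


-- ===== PORT A =====
-- the while-loop of A; the proof argument 0 < bp (true at both call sites) is carried
-- only to justify termination, the computation is A's line for line
lemma le_bor_left (a b : Int) (ha : 0 ≤ a) (hb : 0 ≤ b) : a ≤ PySem.Int.bor a b := by
  rw [PySem.Int.bor_of_nonneg ha hb]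
  have h := Nat.left_le_or (n := a.toNat) (m := b.toNat)
  omega

lemma shl2_eq (a : Int) : a <<< (2:Nat) = 4 * a := by
  rw [Int.shiftLeft_eq]; ring

lemma shl1_eq (a : Int) : a <<< (1:Nat) = 2 * a := by
  rw [Int.shiftLeft_eq]; ring

lemma initLoopA_next_pos (bp : Int) (hbp : 0 < bp) :
    0 < PySem.Int.bor (PySem.Int.bor (bp <<< (2:Nat)) 1 <<< (2:Nat)) 1 := by
  have h1 : (0:Int) ≤ bp <<< (2:Nat) := by rw [shl2_eq]; omega
  have h2 := le_bor_left (bp <<< (2:Nat)) 1 h1 (by norm_num)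
  have h3 : (0:Int) ≤ PySem.Int.bor (bp <<< (2:Nat)) 1 <<< (2:Nat) := by rw [shl2_eq]; omega
  have h4 := le_bor_left (PySem.Int.bor (bp <<< (2:Nat)) 1 <<< (2:Nat)) 1 h3 (by norm_num)
  have h5 := PySem.Int.bor_comm (PySem.Int.bor (bp <<< (2:Nat)) 1 <<< (2:Nat)) 1
  have h6 := le_bor_left 1 (PySem.Int.bor (bp <<< (2:Nat)) 1 <<< (2:Nat)) (by norm_num) h3
  omega

def initLoopA (limit bp : Int) (d : PySem.Dict Int Int) (hbp : 0 < bp) : PySem.Dict Int Int :=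
  let packed := PySem.Int.bor bp (bp <<< (1:Nat))
  if h : packed < limit then
    initLoopA limit (PySem.Int.bor (PySem.Int.bor (bp <<< (2:Nat)) 1 <<< (2:Nat)) 1)
      (d.insert packed 1) (initLoopA_next_pos bp hbp)
  else d
termination_by (limit - bp).toNat
decreasing_by
  have hs1 : (0:Int) ≤ bp <<< (1:Nat) := by rw [shl1_eq]; omega
  have hp := le_bor_left bp (bp <<< (1:Nat)) (le_of_lt hbp) hs1
  have e1 : bp <<< (2:Nat) = 4 * bp := shl2_eq bp
  have a1 := le_bor_left (bp <<< (2:Nat)) 1 (by omega) (by norm_num)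
  have e2 : PySem.Int.bor (bp <<< (2:Nat)) 1 <<< (2:Nat) = 4 * PySem.Int.bor (bp <<< (2:Nat)) 1 := shl2_eq _
  have a2 := le_bor_left (PySem.Int.bor (bp <<< (2:Nat)) 1 <<< (2:Nat)) 1 (by omega) (by norm_num)
  omega

def initializeA000682 (n : Int) : List (Int × Int) :=
  let bridgesTotalIsOdd : Bool := PySem.Int.band n 1 == 1
  -- Python '1 << e' raises for e < 0; Pre_ guarantees 2 + 2*(n+1) ≥ 0, where .toNat is exact
  let archStateLimit : Int := (1 : Int) <<< (2 + 2 * (n + 1)).toNat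
  let arrayBitPattern : Int := if bridgesTotalIsOdd then 1 else PySem.Int.bor ((1:Int) <<< (2:Nat)) 1
  (initLoopA archStateLimit arrayBitPattern ⟨[]⟩ (by
      by_cases h : bridgesTotalIsOdd <;> simp [arrayBitPattern, h] <;> decide)).items

-- ===== PORT B =====
def initializeA000682_alt (n : Int) : List (Int × Int) :=
  let offset : Int := if PySem.Int.band n 1 ≠ 0 then 2 else 4
  let count : Int := PySem.Int.floordiv (2 * n + 4 - offset) 4 + 1
  -- Python '1 << (4*k + offset)': the exponent is ≥ 0 for every k in range(count); .toNat exact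
  (PySem.List.pyRange 0 count 1).map (fun k => ((1 : Int) <<< (4 * k + offset).toNat - 1, 1))

-- ===== PRECONDITION & SPEC =====
-- Pre_ excludes n ≤ -3, where the shift count 2 + 2*(n+1) is negative and Python A raises ValueError
def Pre_initializeA000682 (n : Int) : Prop := -2 ≤ n
instance (n : Int) : Decidable (Pre_initializeA000682 n) := by unfold Pre_initializeA000682; infer_instance
def pvWitness_initializeA000682 : Int := 3

def Spec_initializeA000682 (n : Int) (out : List (Int × Int)) : Prop := out = initializeA000682_alt n
instance (n : Int) (out : List (Int × Int)) : Decidable (Spec_initializeA000682 n out) := by unfold Spec_initializeA000682; infer_instance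

-- ===== CLAIM (what is proved, stated in full; the proofs are below) =====
def Claim_equal_initializeA000682 : Prop := ∀ (n : Int), Dom_initializeA000682 n → Pre_initializeA000682 n → Spec_initializeA000682 n (initializeA000682 n)

-- ===== LEMMAS AND PROOFS =====

-- the alternating bit pattern after j iterations of A's update: 0b0101…01 with j ones
def bpOfN : Nat → Nat
  | 0 => 0
  | j+1 => 4 * bpOfN j + 1

lemma bit_eq (b : Bool) (n : Nat) : Nat.bit b n = 2*n + b.toNat := by
  cases b <;> simp [Nat.bit]

lemma or41 (x : Nat) : (4*x) ||| 1 = 4*x+1 := by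
  have h : (4*x) ||| 1 = Nat.bit false (Nat.bit false x) ||| Nat.bit true 0 := by
    simp [bit_eq]; ring_nf
  rw [h, Nat.lor_bit]
  simp [bit_eq]; ring

lemma bpOr (j : Nat) : bpOfN j ||| 2 * bpOfN j = 3 * bpOfN j := by
  induction j with
  | zero => simp [bpOfN]
  | succ j ih =>
    have e1 : bpOfN (j+1) = Nat.bit true (Nat.bit false (bpOfN j)) := by simp [bpOfN, bit_eq]; ring
    have e2 : 2 * bpOfN (j+1) = Nat.bit false (Nat.bit true (Nat.bit false (bpOfN j))) := by
      simp [bpOfN, bit_eq]; ring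
    rw [e2, e1, Nat.lor_bit, Nat.lor_bit]
    have h2 : Nat.bit false (bpOfN j) = 2 * bpOfN j := by simp [bit_eq]
    rw [h2, ih]; simp [bit_eq, bpOfN]; ring

lemma bpPow (j : Nat) : 3 * bpOfN j + 1 = 2 ^ (2 * j) := by
  induction j with
  | zero => simp [bpOfN]
  | succ j ih => simp [bpOfN, pow_succ, Nat.mul_succ]; omega

-- A's packed state: bp | (bp << 1) = 3*bp = 2^(2j) - 1
lemma pack_eq (j : Nat) :
    PySem.Int.bor (bpOfN j : Int) ((bpOfN j : Int) <<< (1:Nat)) = ((3 * bpOfN j : Nat) : Int) := by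
  have hs : ((bpOfN j : Int)) <<< (1:Nat) = ((2 * bpOfN j : Nat) : Int) := by
    rw [Int.shiftLeft_eq]; push_cast; ring
  rw [hs, PySem.Int.bor_natCast, bpOr]

-- A's update: ((bp << 2) | 1) << 2 | 1 advances the pattern by two ranks
lemma next_eq (j : Nat) :
    PySem.Int.bor (PySem.Int.bor ((bpOfN j : Int) <<< (2:Nat)) 1 <<< (2:Nat)) 1
      = ((bpOfN (j+2) : Nat) : Int) := by
  have hs : ((bpOfN j : Int)) <<< (2:Nat) = ((4 * bpOfN j : Nat) : Int) := by
    rw [Int.shiftLeft_eq]; push_cast; ring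
  have h1 : PySem.Int.bor ((bpOfN j : Int) <<< (2:Nat)) 1 = ((bpOfN (j+1) : Nat) : Int) := by
    rw [hs]
    have : ((1:Int)) = ((1:Nat) : Int) := by norm_num
    rw [this, PySem.Int.bor_natCast, or41]
    simp [bpOfN]
  rw [h1]
  have hs2 : ((bpOfN (j+1) : Int)) <<< (2:Nat) = ((4 * bpOfN (j+1) : Nat) : Int) := by
    rw [Int.shiftLeft_eq]; push_cast; ring
  rw [hs2]
  have : ((1:Int)) = ((1:Nat) : Int) := by norm_num
  rw [this, PySem.Int.bor_natCast, or41]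
  simp [bpOfN]

lemma insert_fresh (d : PySem.Dict Int Int) (k v : Int)
    (h : ∀ q ∈ d.items, q.1 < k) : (d.insert k v).items = d.items ++ [(k, v)] := by
  rw [PySem.Dict.items_insert]
  have hc : d.contains k = false := by
    simp only [PySem.Dict.contains, List.any_eq_false]
    intro p hp
    simp only [beq_iff_eq]
    exact ne_of_lt (h p hp)
  rw [hc]
  simp

lemma bpOfN_pos (j : Nat) (hj : 0 < j) : 0 < bpOfN j := by
  cases j with
  | zero => omega
  | succ j => simp [bpOfN]

lemma loop_eq (M : Nat) : ∀ (c j : Nat) (d : PySem.Dict Int Int) (hj : 0 < j)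
    (h1 : M < 2*j + 4*c) (h2 : 2*j + 4*c ≤ M + 4)
    (hd : ∀ q ∈ d.items, q.1 < ((3 * bpOfN j : Nat) : Int)),
    (initLoopA ((2:Int)^M) ((bpOfN j : Nat) : Int) d (by exact_mod_cast bpOfN_pos j hj)).items
      = d.items ++ (List.range c).map (fun t => ((2:Int)^(2*(j+2*t)) - 1, 1)) := by
  intro c
  induction c with
  | zero =>
    intro j d hj h1 h2 hd
    rw [initLoopA]
    simp only [pack_eq]
    have hlt : ¬ (((3 * bpOfN j : Nat) : Int) < (2:Int)^M) := by
      have hp := bpPow j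
      have hlt2 : (2:Nat)^M < 2^(2*j) := Nat.pow_lt_pow_right one_lt_two (by omega)
      have hc2 : ((2:Int)^M) = ((2^M : Nat) : Int) := by push_cast; ring
      rw [hc2]
      have hn : (2:Nat)^M ≤ 3 * bpOfN j := by omega
      exact not_lt.mpr (by exact_mod_cast hn)
    rw [dif_neg hlt]
    simp
  | succ c ih =>
    intro j d hj h1 h2 hd
    rw [initLoopA]
    simp only [pack_eq, next_eq]
    have hlt : (((3 * bpOfN j : Nat) : Int) < (2:Int)^M) := by
      have hp := bpPow j
      have hle2 : (2:Nat)^(2*j) ≤ 2^M := Nat.pow_le_pow_right (by omega) (by omega)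
      have hc2 : ((2:Int)^M) = ((2^M : Nat) : Int) := by push_cast; ring
      rw [hc2]
      exact_mod_cast (by omega)
    rw [dif_pos hlt]
    have hins : (d.insert ((3 * bpOfN j : Nat) : Int) 1).items
        = d.items ++ [(((3 * bpOfN j : Nat) : Int), 1)] := insert_fresh d _ 1 hd
    have hpj := bpPow j
    have hpj2 := bpPow (j+2)
    have hpowlt : (2:Nat)^(2*j) < 2^(2*(j+2)) := Nat.pow_lt_pow_right one_lt_two (by omega)
    have hmono : 3 * bpOfN j < 3 * bpOfN (j+2) := by omega
    have hrec := ih (j+2) (d.insert ((3 * bpOfN j : Nat) : Int) 1) (by omega) (by omega) (by omega)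
      (by
        intro q hq
        rw [hins] at hq
        rcases List.mem_append.mp hq with h | h
        · exact lt_trans (hd q h) (by exact_mod_cast hmono)
        · simp only [List.mem_singleton] at h
          rw [h]
          simpa using (by exact_mod_cast hmono : ((3 * bpOfN j : Nat) : Int) < ((3 * bpOfN (j+2) : Nat) : Int)))
    rw [hrec, hins]
    have hkey : (((3 * bpOfN j : Nat) : Int)) = (2:Int)^(2*j) - 1 := by
      have hc2 : ((2:Int)^(2*j)) = ((2^(2*j) : Nat) : Int) := by push_cast; ring
      rw [hc2]
      push_cast
      omega
    rw [hkey, List.range_succ_eq_map, List.map_cons, List.map_map]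
    simp only [List.append_assoc, List.cons_append, List.nil_append]
    congr 2
    apply List.map_congr_left
    intro a _
    congr 3
    omega

lemma side_eq (M j : Nat) (off count bp : Int) (hbp : 0 < bp) (hj1 : 0 < j) (hj2 : j ≤ 2)
    (hbpe : bp = ((bpOfN j : Nat) : Int))
    (hoff : off = 2*(j:Int))
    (hcount : count = PySem.Int.floordiv ((M:Int) - off) 4 + 1) :
    (initLoopA ((2:Int)^M) bp ⟨[]⟩ hbp).items
      = (PySem.List.pyRange 0 count 1).map (fun k => ((1:Int) <<< (4*k + off).toNat - 1, 1)) := by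
  subst hbpe
  by_cases h2j : 2*j ≤ M
  · set c : Nat := (M - 2*j)/4 + 1 with hc
    have hcnt : count = (c : Int) := by
      rw [hcount, hoff]
      have e1 : (M:Int) - 2*(j:Int) = ((M - 2*j : Nat) : Int) := by push_cast; omega
      have e4 : ((4:Int)) = ((4:Nat) : Int) := by norm_num
      rw [e1, e4, PySem.Int.floordiv_natCast, hc]
      push_cast
      ring
    have hloop := loop_eq M c j ⟨[]⟩ hj1 (by omega) (by omega) (by intro q hq; simp at hq)
    rw [hloop, hcnt, PySem.List.pyRange_zero_natCast, List.map_map]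
    simp only [List.nil_append]
    apply List.map_congr_left
    intro t _
    simp only [Function.comp_apply]
    have ht : (4*(t:Int) + off).toNat = 4*t + 2*j := by rw [hoff]; omega
    rw [ht, Int.shiftLeft_eq, one_mul]
    have he : 4*t + 2*j = 2*(j + 2*t) := by ring
    rw [he]
  · have hcnt : count = 0 := by
      rw [hcount, hoff]
      have hfd : PySem.Int.floordiv ((M:Int) - 2*(j:Int)) 4 = -1 := by
        rw [PySem.Int.floordiv_eq_iff_of_pos (by norm_num)]
        constructor <;> push_cast <;> omega
      rw [hfd]
      ring
    have hloop := loop_eq M 0 j ⟨[]⟩ hj1 (by omega) (by omega) (by intro q hq; simp at hq)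
    rw [hloop, hcnt]
    simp [PySem.List.pyRange_one_eq_nil]

lemma band_one_even (n : Int) (he : Even n) : PySem.Int.band n 1 = 0 := by
  rw [PySem.Int.band_one, PySem.Int.mod_eq_emod_of_pos (by norm_num)]
  exact Int.even_iff.mp he

lemma band_one_odd (n : Int) (ho : Odd n) : PySem.Int.band n 1 = 1 := by
  rw [PySem.Int.band_one, PySem.Int.mod_eq_emod_of_pos (by norm_num)]
  exact Int.odd_iff.mp ho

lemma main_eq (n : Int) (hn : -2 ≤ n) : initializeA000682 n = initializeA000682_alt n := by
  have hM : (((2 + 2*(n+1)).toNat : Nat) : Int) = 2*n + 4 := by omega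
  have hlim : (1:Int) <<< (2 + 2*(n+1)).toNat = 2^((2 + 2*(n+1)).toNat) := by
    rw [Int.shiftLeft_eq]; ring
  rcases Int.even_or_odd n with he | ho
  · have hb := band_one_even n he
    have hif : (if (PySem.Int.band n 1 == 1) = true then (1:Int) else PySem.Int.bor ((1:Int) <<< (2:Nat)) 1)
        = ((bpOfN 2 : Nat) : Int) := by rw [hb]; decide
    have hoff_if : (if PySem.Int.band n 1 ≠ 0 then (2:Int) else 4) = 4 := by rw [hb]; norm_num
    simp only [initializeA000682, initializeA000682_alt, hif, hoff_if, hlim]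
    exact side_eq _ 2 4 _ _ _ (by omega) (by omega) rfl (by norm_num) (by rw [hM])
  · have hb := band_one_odd n ho
    have hif : (if (PySem.Int.band n 1 == 1) = true then (1:Int) else PySem.Int.bor ((1:Int) <<< (2:Nat)) 1)
        = ((bpOfN 1 : Nat) : Int) := by rw [hb]; decide
    have hoff_if : (if PySem.Int.band n 1 ≠ 0 then (2:Int) else 4) = 2 := by rw [hb]; norm_num
    simp only [initializeA000682, initializeA000682_alt, hif, hoff_if, hlim]
    exact side_eq _ 1 2 _ _ _ (by omega) (by omega) rfl (by norm_num) (by rw [hM])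

-- ===== VERDICT (by name: the statement is the Claim_ definition above) =====
theorem initializeA000682_spec : Claim_equal_initializeA000682 := by
  intro n _ hpre
  unfold Spec_initializeA000682
  exact main_eq n hpre
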